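-- pv_equiv track=rewrite | github.com/park-jun-woo/geul-entity | finished/scripts/stage2_run.py | derive_era_from_birth
-- ===== SOURCE A (Python) =====
-- def derive_era_from_birth(entity_props: dict):
--     """P569(생년)에서 Era(시대) 파생"""
--     for entity_id, props in entity_props.items():
--         birth = props.get('P569')
--         if birth:
--             try:
--                 # 위키데이터 시간 포맷: +YYYY-MM-DDT00:00:00Z
--                 if birth.startswith('+') or birth.startswith('-'):
--                     year_str = birth[1:].split('-')[0]
--                     year = int(year_str)
--                 else:
--                     year = int(birth[:4])
--
--                 # 시대 분류
--                 if year < -3000: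
--                     era = 'Prehistoric'
--                 elif year < 500:
--                     era = 'Ancient'
--                 elif year < 1500:
--                     era = 'Medieval'
--                 elif year < 1800:
--                     era = 'EarlyModern'
--                 elif year < 1900:
--                     era = 'C19'
--                 elif year < 2000:
--                     era = 'C20'
--                 else:
--                     era = 'C21'
--
--                 props['ERA'] = era
--             except:
--                 pass
--     return entity_props
-- ===== SOURCE B (Python) =====
-- # Alternative implementation: year parsing is factored into a total helper
-- # applied directly to the Optional birth field, and the era is found by a
-- # hand-written binary search (bisect_right) over a sorted boundary table
-- # instead of A's if-elif cascade.  Like A, mutates the inner props dicts in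
-- # place and returns entity_props.
--
-- _BOUNDS = (-3000, 500, 1500, 1800, 1900, 2000)
-- _ERAS = ('Prehistoric', 'Ancient', 'Medieval', 'EarlyModern', 'C19', 'C20', 'C21')
--
--
-- def _year_of(birth):
--     """Year of a Wikidata time string, or None if missing/empty/unparsable."""
--     if not birth:
--         return None
--     head = birth[1:].split('-')[0] if birth[:1] in '+-' else birth[:4]
--     try:
--         return int(head)
--     except ValueError:
--         return None
--
--
-- def derive_era_from_birth(entity_props: dict):
--     for props in entity_props.values():
--         year = _year_of(props.get('P569'))
--         if year is not None:
--             # binary search: lo ends as the number of boundaries <= year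
--             lo, hi = 0, len(_BOUNDS)
--             while lo < hi:
--                 mid = (lo + hi) // 2
--                 if _BOUNDS[mid] <= year:
--                     lo = mid + 1
--                 else:
--                     hi = mid
--             props['ERA'] = _ERAS[lo]
--     return entity_props
-- ===== Notes on version B (the rewrite author's own statement) =====
-- stated objective: alternative
-- what changed: The 7-branch if-elif era cascade is replaced by a hand-written binary search (bisect_right) over a sorted boundary table, and the year parsing is factored into a total helper taking the Optional birth field (returning None when missing/empty/unparsable) instead of a truthiness guard plus a bare try/except around the whole body.
import Mathlib
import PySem

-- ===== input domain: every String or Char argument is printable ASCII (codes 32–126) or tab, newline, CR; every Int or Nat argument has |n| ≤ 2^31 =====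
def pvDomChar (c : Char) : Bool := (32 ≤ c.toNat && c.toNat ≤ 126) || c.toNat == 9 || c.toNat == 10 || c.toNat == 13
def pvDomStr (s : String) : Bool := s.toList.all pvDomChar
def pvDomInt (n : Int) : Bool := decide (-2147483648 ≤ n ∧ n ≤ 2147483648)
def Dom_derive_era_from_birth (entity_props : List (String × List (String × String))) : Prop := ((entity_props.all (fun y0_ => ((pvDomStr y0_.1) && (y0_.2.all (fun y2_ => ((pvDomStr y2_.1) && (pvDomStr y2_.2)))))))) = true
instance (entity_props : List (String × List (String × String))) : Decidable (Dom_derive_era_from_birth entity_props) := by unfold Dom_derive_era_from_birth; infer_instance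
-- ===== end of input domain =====

-- ===== PORT A =====
-- Transliteration of A. Side effects: the Python mutates the inner props dicts in
-- place and returns the same entity_props object; the equivalence here is about the
-- returned value. Inner dicts are handled through PySem.Dict (get? / insert).
-- `split('-')[0]`: split? with a nonempty separator always returns `some` of a
-- nonempty list, so getD []/headD "" are exact; the only step of the try-block that
-- can raise is int(), so `except: pass` is the `none` branch of ofStr?.
def derive_era_from_birth (entity_props : List (String × List (String × String))) : List (String × List (String × String)) :=
  entity_props.map (fun p =>
    match PySem.Dict.get? (PySem.Dict.mk p.2) "P569" with
    | none => p                                  -- props.get returns None: falsy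
    | some birth =>
      if birth = "" then p                       -- `if birth:` — "" is falsy
      else
        let yearOpt : Option Int :=
          if PySem.Str.startswith birth "+" || PySem.Str.startswith birth "-" then
            PySem.Int.ofStr? (((PySem.Str.split? (PySem.Str.slice birth (some 1) none) "-").getD []).headD "")
          else
            PySem.Int.ofStr? (PySem.Str.slice birth none (some 4))
        match yearOpt with
        | none => p                              -- int() raised: except: pass
        | some year =>
          let era : String :=
            if year < -3000 then "Prehistoric"
            else if year < 500 then "Ancient"
            else if year < 1500 then "Medieval"
            else if year < 1800 then "EarlyModern"
            else if year < 1900 then "C19"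
            else if year < 2000 then "C20"
            else "C21"
          (p.1, (PySem.Dict.insert (PySem.Dict.mk p.2) "ERA" era).items))

-- ===== PORT B =====
-- Transliteration of Source B: pvYearOf is _year_of applied to the Optional birth
-- field; pvBisect is the hand-written binary-search while-loop (whenever it
-- indexes _BOUNDS, lo < hi ≤ 6 so mid < 6: indexing never raises and getD is
-- exact); the era is _ERAS[lo] (lo ≤ 6 always, so getD is exact).
def pvBounds : List Int := [-3000, 500, 1500, 1800, 1900, 2000]

def pvEras : List String := ["Prehistoric", "Ancient", "Medieval", "EarlyModern", "C19", "C20", "C21"]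

def pvYearOf (birth : Option String) : Option Int :=
  match birth with
  | none => none                                 -- `if not birth` — None is falsy
  | some b =>
    if b = "" then none                          -- "" is falsy
    else
      PySem.Int.ofStr?
        (if PySem.Str.isIn (PySem.Str.slice b none (some 1)) "+-" then
           ((PySem.Str.split? (PySem.Str.slice b (some 1) none) "-").getD []).headD ""
         else
           PySem.Str.slice b none (some 4))

def pvBisect (year : Int) (lo hi : Nat) : Nat :=
  if _h : lo < hi then
    if pvBounds.getD ((lo + hi) / 2) 0 ≤ year then pvBisect year ((lo + hi) / 2 + 1) hi
    else pvBisect year lo ((lo + hi) / 2)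
  else lo
termination_by hi - lo
decreasing_by all_goals omega

def derive_era_from_birth_alt (entity_props : List (String × List (String × String))) : List (String × List (String × String)) :=
  entity_props.map (fun p =>
    match pvYearOf (PySem.Dict.get? (PySem.Dict.mk p.2) "P569") with
    | none => p
    | some year =>
      (p.1, (PySem.Dict.insert (PySem.Dict.mk p.2) "ERA"
               (pvEras.getD (pvBisect year 0 pvBounds.length) "")).items))

-- ===== PRECONDITION & SPEC =====
def Spec_derive_era_from_birth (entity_props : List (String × List (String × String))) (out : List (String × List (String × String))) : Prop := out = derive_era_from_birth_alt entity_props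
instance (entity_props : List (String × List (String × String))) (out : List (String × List (String × String))) : Decidable (Spec_derive_era_from_birth entity_props out) := by unfold Spec_derive_era_from_birth; infer_instance

-- ===== CLAIM (what is proved, stated in full; the proofs are below) =====
def Claim_equal_derive_era_from_birth : Prop := ∀ (entity_props : List (String × List (String × String))), Dom_derive_era_from_birth entity_props → Spec_derive_era_from_birth entity_props (derive_era_from_birth entity_props)

-- ===== LEMMAS AND PROOFS =====

-- The era cascade is exactly the boundary table read at the binary-search index.
theorem pv_bisect_table_eq (year : Int) :
    (if year < -3000 then "Prehistoric"
     else if year < 500 then "Ancient"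
     else if year < 1500 then "Medieval"
     else if year < 1800 then "EarlyModern"
     else if year < 1900 then "C19"
     else if year < 2000 then "C20"
     else "C21")
      = pvEras.getD (pvBisect year 0 pvBounds.length) "" := by
  have hlen : pvBounds.length = 6 := by norm_num [pvBounds]
  rw [hlen]
  split_ifs with h1 h2 h3 h4 h5 h6 <;>
  · repeat first
      | (rw [pvBisect]; norm_num [pvBounds, pvEras])
      | rw [if_pos (by omega)]
      | rw [if_neg (by omega)]
    decide

-- `birth[:1] in '+-'` agrees with `birth.startswith('+') or birth.startswith('-')`
-- on nonempty strings.
theorem pv_sign_test_eq (birth : String) (h : birth.toList ≠ []) :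
    PySem.Str.isIn (PySem.Str.slice birth none (some 1)) "+-"
      = (PySem.Str.startswith birth "+" || PySem.Str.startswith birth "-") := by
  rcases hl : birth.toList with _ | ⟨c, rest⟩
  · exact absurd hl h
  · rw [Bool.eq_iff_iff]
    simp [PySem.Str.isIn, PySem.Str.startswith, PySem.Str.slice, hl,
      PySem.Chars.isIn_iff_infix, PySem.Chars.startswith_iff,
      List.cons_prefix_cons, PySem.Chars.slice_eq_listSlice,
      PySem.List.slice_to, List.singleton_infix_iff]
    tauto

-- Both ports parse the year identically on present, nonempty birth strings.
theorem pv_year_eq (birth : String) (h : birth ≠ "") :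
    (if PySem.Str.startswith birth "+" || PySem.Str.startswith birth "-" then
       PySem.Int.ofStr? (((PySem.Str.split? (PySem.Str.slice birth (some 1) none) "-").getD []).headD "")
     else
       PySem.Int.ofStr? (PySem.Str.slice birth none (some 4)))
      = pvYearOf (some birth) := by
  have hl : birth.toList ≠ [] := by simp [h]
  simp only [pvYearOf, if_neg h]
  rw [← apply_ite PySem.Int.ofStr?, pv_sign_test_eq birth hl]

-- ===== VERDICT (by name: the statement is the Claim_ definition above) =====
set_option maxHeartbeats 2000000 in
theorem derive_era_from_birth_spec : Claim_equal_derive_era_from_birth := by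
  intro entity_props _
  unfold Spec_derive_era_from_birth derive_era_from_birth derive_era_from_birth_alt
  apply List.map_congr_left
  intro p _
  cases hg : PySem.Dict.get? (PySem.Dict.mk p.2) "P569" with
  | none => rfl
  | some birth =>
    by_cases hb : birth = ""
    · simp [hb, pvYearOf]
    · simp only [if_neg hb]
      rw [pv_year_eq birth hb]
      cases hy : pvYearOf (some birth) with
      | none => rfl
      | some year =>
        exact congrArg
          (fun e => (p.1, (PySem.Dict.insert (PySem.Dict.mk p.2) "ERA" e).items))
          (pv_bisect_table_eq year)
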